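-- pv_equiv track=rewrite | github.com/ejmiddle/neckar_wave_scripts2 | src/accounting/ui/browse_tab.py | _unique_download_name
-- ===== SOURCE A (Python) =====
-- def _unique_download_name(filename: str, seen_filenames: set[str]) -> str:
--     candidate = filename.strip() or "beleg.pdf"
--     if candidate not in seen_filenames:
--         seen_filenames.add(candidate)
--         return candidate
--
--     stem, dot, suffix = candidate.rpartition(".")
--     base_name = stem if dot else candidate
--     extension = f".{suffix}" if dot else ""
--     counter = 2
--     while True:
--         deduped_name = f"{base_name}_{counter}{extension}"
--         if deduped_name not in seen_filenames:
--             seen_filenames.add(deduped_name)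
--             return deduped_name
--         counter += 1
-- ===== SOURCE B (Python) =====
-- def _unique_download_name(filename: str, seen_filenames: set) -> str:
--     candidate = filename.strip() or "beleg.pdf"
--     if candidate not in seen_filenames:
--         seen_filenames.add(candidate)
--         return candidate
--     stem, dot, suffix = candidate.rpartition(".")
--     base_name = stem if dot else candidate
--     extension = f".{suffix}" if dot else ""
--     prefix = base_name + "_"
--     middles = set()
--     for name in seen_filenames:
--         if (name.startswith(prefix) and name.endswith(extension)
--                 and len(name) >= len(prefix) + len(extension)):
--             middles.add(name[len(prefix):len(name) - len(extension)])
--     counter = 2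
--     while str(counter) in middles:
--         counter += 1
--     result = f"{prefix}{counter}{extension}"
--     seen_filenames.add(result)
--     return result
-- ===== Notes on version B (the rewrite author's own statement) =====
-- stated objective: alternative
-- what changed: A probes candidate names 'base_2', 'base_3', ... against the whole seen set until one is free; B instead makes one pass over seen extracting the counter 'middles' of names shaped like base_<x><ext> into a small set, then returns the least counter whose decimal form is not among those middles.
import Mathlib
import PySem

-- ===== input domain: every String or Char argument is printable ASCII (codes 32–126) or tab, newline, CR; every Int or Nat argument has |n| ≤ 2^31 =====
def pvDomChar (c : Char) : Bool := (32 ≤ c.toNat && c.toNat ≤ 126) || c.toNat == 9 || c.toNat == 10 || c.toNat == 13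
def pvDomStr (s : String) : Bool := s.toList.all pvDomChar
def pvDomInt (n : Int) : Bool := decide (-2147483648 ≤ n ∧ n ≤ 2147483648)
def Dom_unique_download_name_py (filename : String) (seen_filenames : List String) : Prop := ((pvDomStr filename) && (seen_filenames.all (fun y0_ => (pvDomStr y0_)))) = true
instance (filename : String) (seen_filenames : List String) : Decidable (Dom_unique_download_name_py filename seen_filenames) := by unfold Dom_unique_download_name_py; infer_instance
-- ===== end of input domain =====

-- B replaces A's probe-the-whole-seen-set loop by one extraction pass (the counter "middles"
-- of names shaped base_<x><ext>) followed by a least-free-counter scan over that small set;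
-- same return value (both Pythons also add the returned name to the seen set, a mutation this
-- equivalence does not model).

-- ===== PORT A =====
-- shared preprocessing (identical lines in both Pythons): candidate = filename.strip() or "beleg.pdf"
def pvCandidate (filename : String) : String :=
  let stripped := PySem.Str.strip filename
  if stripped = "" then "beleg.pdf" else stripped

-- shared preprocessing: stem, dot, suffix = candidate.rpartition("."); base/ext as in the source
-- (rpartition ported by hand via rfind: exact — last '.' splits, no '.' gives (candidate, ""))
def pvSplitExt (cs : List Char) : List Char × List Char :=
  let i := PySem.Chars.rfind cs ['.']
  if i = -1 then (cs, []) else (cs.take i.toNat, '.' :: cs.drop (i.toNat + 1))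

-- A's 'while True' loop, fuel-guarded; fuel seen.length + 1 always suffices (proved below)
def uniqLoopA (seenL : List (List Char)) (base ext : List Char) (counter : Int) : Nat → List Char
  | 0 => base ++ '_' :: PySem.Int.toChars counter ++ ext
  | f + 1 =>
    let deduped := base ++ '_' :: PySem.Int.toChars counter ++ ext
    if deduped ∈ seenL then uniqLoopA seenL base ext (counter + 1) f else deduped

def unique_download_name_py (filename : String) (seen_filenames : List String) : String :=
  let candidate := pvCandidate filename
  if candidate ∉ seen_filenames then candidate
  else
    let be := pvSplitExt candidate.toList
    String.ofList (uniqLoopA (seen_filenames.map String.toList) be.1 be.2 2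
      (seen_filenames.length + 1))

-- ===== PORT B =====
-- one pass over seen: collect middle = name[len(pre) : len(name)-len(ext)] of every matching name
def collectTaken (seenL : List (List Char)) (pre ext : List Char) : PySem.Set (List Char) :=
  seenL.foldl (fun taken name =>
    if PySem.Chars.startswith name pre && PySem.Chars.endswith name ext
        && decide (pre.length + ext.length ≤ name.length) then
      PySem.Set.add taken
        (PySem.Chars.slice name (some (pre.length : Int))
          (some ((name.length : Int) - (ext.length : Int))))
    else taken) PySem.Set.empty

-- B's 'while str(counter) in middles' loop, fuel-guarded; fuel taken.length + 1 suffices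
def mexFrom (taken : PySem.Set (List Char)) (counter : Int) : Nat → Int
  | 0 => counter
  | f + 1 =>
    if PySem.Int.toChars counter ∈ taken then mexFrom taken (counter + 1) f else counter

def unique_download_name_py_alt (filename : String) (seen_filenames : List String) : String :=
  let candidate := pvCandidate filename
  if candidate ∉ seen_filenames then candidate
  else
    let be := pvSplitExt candidate.toList
    let pre := be.1 ++ ['_']
    let taken := collectTaken (seen_filenames.map String.toList) pre be.2
    let c := mexFrom taken 2 (taken.length + 1)
    String.ofList (pre ++ PySem.Int.toChars c ++ be.2)

-- ===== PRECONDITION & SPEC =====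
def Spec_unique_download_name_py (filename : String) (seen_filenames : List String) (out : String) : Prop := out = unique_download_name_py_alt filename seen_filenames
instance (filename : String) (seen_filenames : List String) (out : String) : Decidable (Spec_unique_download_name_py filename seen_filenames out) := by unfold Spec_unique_download_name_py; infer_instance

-- ===== CLAIM (what is proved, stated in full; the proofs are below) =====
def Claim_equal_unique_download_name_py : Prop := ∀ (filename : String) (seen_filenames : List String), Dom_unique_download_name_py filename seen_filenames → Spec_unique_download_name_py filename seen_filenames (unique_download_name_py filename seen_filenames)

-- ===== LEMMAS AND PROOFS =====

-- str(n) is injective on the naturals (decimal digit strings agree only for equal numbers)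
theorem pv_digitChar_toNat (m : Nat) (h : m < 10) : (Nat.digitChar m).toNat = 48 + m := by
  interval_cases m <;> rfl

theorem pv_toDigits_inj : ∀ (m n : Nat), Nat.toDigits 10 m = Nat.toDigits 10 n → m = n := by
  intro m
  induction m using Nat.strong_induction_on with
  | _ m ih =>
    intro n h
    rcases Nat.lt_or_ge m 10 with hm | hm
    · rcases Nat.lt_or_ge n 10 with hn | hn
      · rw [Nat.toDigits_of_lt_base hm, Nat.toDigits_of_lt_base hn] at h
        have h2 : (Nat.digitChar m).toNat = (Nat.digitChar n).toNat := by
          injection h with h1 _; rw [h1]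
        rw [pv_digitChar_toNat m hm, pv_digitChar_toNat n hn] at h2
        omega
      · rw [Nat.toDigits_of_lt_base hm, Nat.toDigits_eq_if (by norm_num),
          if_neg (by omega)] at h
        have hl := congrArg List.length h
        have hp := Nat.length_toDigits_pos (b := 10) (n := n / 10)
        simp only [List.length_append, List.length_cons, List.length_nil] at hl
        omega
    · rcases Nat.lt_or_ge n 10 with hn | hn
      · rw [Nat.toDigits_of_lt_base hn, Nat.toDigits_eq_if (by norm_num),
          if_neg (by omega)] at h
        have hl := congrArg List.length h
        have hp := Nat.length_toDigits_pos (b := 10) (n := m / 10)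
        simp only [List.length_append, List.length_cons, List.length_nil] at hl
        omega
      · rw [Nat.toDigits_eq_if (b := 10) (n := m) (by norm_num), if_neg (by omega),
          Nat.toDigits_eq_if (b := 10) (n := n) (by norm_num), if_neg (by omega)] at h
        have hsp := List.append_inj' h rfl
        have hdiv : m / 10 = n / 10 := ih (m / 10) (Nat.div_lt_self (by omega) (by norm_num)) _ hsp.1
        have h2 : (Nat.digitChar (m % 10)).toNat = (Nat.digitChar (n % 10)).toNat := by
          have := hsp.2; injection this with h1 _; rw [h1]
        rw [pv_digitChar_toNat _ (Nat.mod_lt _ (by norm_num)),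
          pv_digitChar_toNat _ (Nat.mod_lt _ (by norm_num))] at h2
        omega

theorem pv_toChars_inj {a b : Int} (ha : 0 ≤ a) (hb : 0 ≤ b)
    (h : PySem.Int.toChars a = PySem.Int.toChars b) : a = b := by
  unfold PySem.Int.toChars at h
  rw [if_neg (by omega), if_neg (by omega)] at h
  have := pv_toDigits_inj _ _ h
  omega

-- what lands in B's 'taken' set
theorem pv_mem_collectTaken (seenL : List (List Char)) (pre ext m : List Char) :
    m ∈ collectTaken seenL pre ext ↔
      ∃ name ∈ seenL,
        (PySem.Chars.startswith name pre && PySem.Chars.endswith name ext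
          && decide (pre.length + ext.length ≤ name.length)) = true ∧
        m = PySem.Chars.slice name (some (pre.length : Int))
              (some ((name.length : Int) - (ext.length : Int))) := by
  unfold collectTaken
  rw [PySem.List.foldl_if_eq_foldl_filter, ← PySem.Set.update_map_eq_foldl_add,
    PySem.Set.update_empty]
  simp only [PySem.Set.mem_ofList, List.mem_map, List.mem_filter]
  constructor
  · rintro ⟨name, ⟨hmem, hcond⟩, rfl⟩
    exact ⟨name, hmem, hcond, rfl⟩
  · rintro ⟨name, hmem, hcond, rfl⟩
    exact ⟨name, ⟨hmem, hcond⟩, rfl⟩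

-- KEY: the candidate name for counter c is seen  ↔  its middle str(c) was collected
theorem pv_key (seenL : List (List Char)) (pre ext : List Char) (c : Int) :
    (pre ++ PySem.Int.toChars c ++ ext) ∈ seenL ↔
      PySem.Int.toChars c ∈ collectTaken seenL pre ext := by
  rw [pv_mem_collectTaken]
  constructor
  · intro hmem
    refine ⟨pre ++ PySem.Int.toChars c ++ ext, hmem, ?_, ?_⟩
    · simp only [Bool.and_eq_true, PySem.Chars.startswith_iff, PySem.Chars.endswith_iff,
        decide_eq_true_eq, List.length_append]
      refine ⟨⟨?_, ?_⟩, by omega⟩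
      · rw [List.append_assoc]; exact List.prefix_append _ _
      · exact List.suffix_append _ _
    · have hb : ((pre ++ PySem.Int.toChars c ++ ext).length : Int) - (ext.length : Int)
          = ((pre.length + (PySem.Int.toChars c).length : Nat) : Int) := by
        simp only [List.length_append]; push_cast; ring
      rw [PySem.Chars.slice_eq_listSlice, hb, PySem.List.slice_natCast,
        Nat.add_sub_cancel_left, List.append_assoc, List.drop_left,
        List.take_left]
  · rintro ⟨name, hmem, hcond, hmid⟩
    simp only [Bool.and_eq_true, PySem.Chars.startswith_iff, PySem.Chars.endswith_iff,
      decide_eq_true_eq] at hcond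
    obtain ⟨⟨hpre, hext⟩, hlen⟩ := hcond
    obtain ⟨t, ht⟩ := hext
    have hlt : pre.length ≤ t.length := by
      have := congrArg List.length ht
      simp only [List.length_append] at this
      omega
    have htake : t.take pre.length = pre := by
      obtain ⟨r, hr⟩ := hpre
      have h1 : (t ++ ext).take pre.length = t.take pre.length :=
        List.take_append_of_le_length hlt
      rw [ht, ← hr, List.take_left] at h1
      exact h1.symm
    have hb : ((name.length : Int) - (ext.length : Int)) = ((t.length : Nat) : Int) := by
      have := congrArg List.length ht
      simp only [List.length_append] at this
      omega
    rw [PySem.Chars.slice_eq_listSlice, hb, PySem.List.slice_natCast, ← ht] at hmid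
    rw [List.drop_append_of_le_length hlt] at hmid
    have hmid2 : t.drop pre.length = PySem.Int.toChars c := by
      rw [hmid, List.take_left' (by simp)]
    have : name = pre ++ PySem.Int.toChars c ++ ext := by
      calc name = t ++ ext := ht.symm
        _ = (t.take pre.length ++ t.drop pre.length) ++ ext := by
              rw [List.take_append_drop]
        _ = pre ++ PySem.Int.toChars c ++ ext := by rw [htake, hmid2]
    rw [← this]
    exact hmem

-- taken is a deduplicated image of a filtered pass, hence no longer than seenL
theorem pv_taken_len (seenL : List (List Char)) (pre ext : List Char) :
    (collectTaken seenL pre ext).length ≤ seenL.length := by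
  unfold collectTaken
  rw [PySem.List.foldl_if_eq_foldl_filter, ← PySem.Set.update_map_eq_foldl_add,
    PySem.Set.update_empty]
  calc (PySem.Set.ofList _).length ≤ _ := PySem.Set.length_ofList_le _
    _ = (List.filter _ seenL).length := List.length_map ..
    _ ≤ seenL.length := List.length_filter_le _ _

-- pigeonhole: some counter in 2 .. 2+|taken| has its string form outside taken
theorem pv_pigeon (taken : PySem.Set (List Char)) :
    ∃ k : Nat, k ≤ taken.length ∧ PySem.Int.toChars (2 + (k : Int)) ∉ taken := by
  by_contra hco
  push Not at hco
  have hsub : (List.range (taken.length + 1)).map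
      (fun k : Nat => PySem.Int.toChars (2 + (k : Int))) ⊆ taken := by
    intro x hx
    obtain ⟨k, hk, rfl⟩ := List.mem_map.mp hx
    exact hco k (by simpa using Nat.lt_succ_iff.mp (List.mem_range.mp hk))
  have hnd : ((List.range (taken.length + 1)).map
      (fun k : Nat => PySem.Int.toChars (2 + (k : Int)))).Nodup := by
    refine List.Nodup.map_on ?_ (List.nodup_range)
    intro x _ y _ hxy
    have := pv_toChars_inj (a := 2 + (x : Int)) (b := 2 + (y : Int))
      (by omega) (by omega) hxy
    omega
  have := (hnd.subperm hsub).length_le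
  simp at this

-- the two fuel-guarded loops agree as soon as each has fuel past the first free counter
theorem pv_loops (seenL : List (List Char)) (base ext : List Char) :
    ∀ (fA fB : Nat) (c : Int), 0 ≤ c →
    (∃ k : Nat, k < fA ∧ (base ++ ['_']) ++ PySem.Int.toChars (c + (k : Int)) ++ ext ∉ seenL) →
    (∃ k : Nat, k < fB ∧
        PySem.Int.toChars (c + (k : Int)) ∉ collectTaken seenL (base ++ ['_']) ext) →
    uniqLoopA seenL base ext c fA =
      (base ++ ['_']) ++ PySem.Int.toChars (mexFrom (collectTaken seenL (base ++ ['_']) ext) c fB) ++ ext := by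
  intro fA
  induction fA with
  | zero =>
    rintro fB c _ ⟨k, hk, _⟩ _
    omega
  | succ fA ih =>
    rintro fB c hc ⟨kA, hkA, hfreeA⟩ ⟨kB, hkB, hfreeB⟩
    match fB with
    | 0 => omega
    | fB + 1 =>
      have hX : base ++ '_' :: PySem.Int.toChars c ++ ext
          = (base ++ ['_']) ++ PySem.Int.toChars c ++ ext := by simp
      simp only [uniqLoopA, mexFrom]
      rw [hX]
      by_cases h : (base ++ ['_']) ++ PySem.Int.toChars c ++ ext ∈ seenL
      · have h' : PySem.Int.toChars c ∈ collectTaken seenL (base ++ ['_']) ext :=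
          (pv_key seenL (base ++ ['_']) ext c).mp h
        rw [if_pos h, if_pos h']
        have hkA0 : kA ≠ 0 := by
          rintro rfl; rw [Nat.cast_zero, add_zero] at hfreeA; exact hfreeA h
        have hkB0 : kB ≠ 0 := by
          rintro rfl; rw [Nat.cast_zero, add_zero] at hfreeB; exact hfreeB h'
        obtain ⟨kA', rfl⟩ := Nat.exists_eq_succ_of_ne_zero hkA0
        obtain ⟨kB', rfl⟩ := Nat.exists_eq_succ_of_ne_zero hkB0
        refine ih fB (c + 1) (by omega) ⟨kA', by omega, ?_⟩ ⟨kB', by omega, ?_⟩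
        · have : c + 1 + (kA' : Int) = c + ((kA' + 1 : Nat) : Int) := by push_cast; ring
          rw [this]; exact hfreeA
        · have : c + 1 + (kB' : Int) = c + ((kB' + 1 : Nat) : Int) := by push_cast; ring
          rw [this]; exact hfreeB
      · have h' : PySem.Int.toChars c ∉ collectTaken seenL (base ++ ['_']) ext :=
          fun hm => h ((pv_key seenL (base ++ ['_']) ext c).mpr hm)
        rw [if_neg h, if_neg h']

-- ===== VERDICT (by name: the statement is the Claim_ definition above) =====
theorem unique_download_name_py_spec : Claim_equal_unique_download_name_py := by
  intro filename seen_filenames _dom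
  unfold Spec_unique_download_name_py unique_download_name_py unique_download_name_py_alt
  by_cases hc : pvCandidate filename ∉ seen_filenames
  · simp only [if_pos hc]
  · simp only [if_neg hc]
    set seenL := seen_filenames.map String.toList with hseenL
    set be := pvSplitExt (pvCandidate filename).toList with hbe
    set taken := collectTaken seenL (be.1 ++ ['_']) be.2 with htaken
    obtain ⟨k, hkle, hkfree⟩ := pv_pigeon taken
    have hlen : taken.length ≤ seen_filenames.length := by
      calc taken.length ≤ seenL.length := pv_taken_len ..
        _ = seen_filenames.length := List.length_map ..
    refine congrArg String.ofList ?_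
    refine pv_loops seenL be.1 be.2 (seen_filenames.length + 1) (taken.length + 1) 2
      (by omega) ⟨k, by omega, ?_⟩ ⟨k, by omega, hkfree⟩
    exact fun hm => hkfree ((pv_key seenL (be.1 ++ ['_']) be.2 (2 + (k : Int))).mp hm)
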